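-- pv_equiv track=rewrite | github.com/ctc316/algorithm-python | Lintcode/Ladder_all_G_OA/1623. Minimal Distance In The Array.py | minimalDistance
-- ===== SOURCE A (Python) =====
-- def minimalDistance(a, b):
--     from bisect import bisect_left
--     a = sorted(a)
--     result = []
--     for target in b:
--         pos = bisect_left(a, target)
--         if pos == 0:
--             result.append(a[0])
--         elif pos == len(a):
--             result.append(a[-1])
--         elif target - a[pos - 1] <= a[pos] - target:
--             result.append(a[pos - 1])
--         else:
--             result.append(a[pos])
--
--     return result
-- ===== SOURCE B (Python) =====
-- def minimalDistance(a, b):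
--     result = []
--     for target in b:
--         best = a[0]
--         for x in a[1:]:
--             if abs(x - target) < abs(best - target) or \
--                (abs(x - target) == abs(best - target) and x < best):
--                 best = x
--         result.append(best)
--     return result
-- ===== Notes on version B (the rewrite author's own statement) =====
-- stated objective: simpler
-- what changed: Replaces sort + binary search + four positional branches by a single linear scan per query that keeps the current nearest element, breaking ties toward the smaller value.
import Mathlib
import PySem

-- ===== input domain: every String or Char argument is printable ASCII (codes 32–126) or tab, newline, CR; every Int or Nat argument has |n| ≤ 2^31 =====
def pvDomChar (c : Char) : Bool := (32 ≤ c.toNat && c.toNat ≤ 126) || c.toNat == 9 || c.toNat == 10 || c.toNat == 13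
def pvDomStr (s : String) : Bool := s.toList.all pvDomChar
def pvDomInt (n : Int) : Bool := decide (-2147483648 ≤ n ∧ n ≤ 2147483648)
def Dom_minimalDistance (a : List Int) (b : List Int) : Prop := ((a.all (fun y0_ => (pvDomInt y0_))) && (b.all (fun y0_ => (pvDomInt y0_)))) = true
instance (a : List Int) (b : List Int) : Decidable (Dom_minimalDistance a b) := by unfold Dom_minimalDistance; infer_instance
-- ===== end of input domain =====

-- B replaces sort + binary search by a per-query linear scan keeping the current nearest
-- element (ties toward the smaller value): simpler, no sorting, same results.


-- ===== PORT A =====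
-- One loop step of A: bisect into the sorted list, then the four positional branches.
-- Indexing is pyGet? (none = IndexError); a none aborts the whole fold, and the final
-- .getD [] is only reachable outside Pre_ (a = [] with b ≠ [], where Python raises).
def stepA (s : List Int) (acc : Option (List Int)) (target : Int) : Option (List Int) :=
  acc.bind fun res =>
    let pos := PySem.List.bisectLeft s target
    if pos = 0 then (PySem.List.pyGet? s 0).map (fun v => res ++ [v])
    else if pos = s.length then (PySem.List.pyGet? s (-1)).map (fun v => res ++ [v])
    else
      match PySem.List.pyGet? s ((pos : Int) - 1), PySem.List.pyGet? s (pos : Int) with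
      | some u, some v => some (res ++ [if target - u ≤ v - target then u else v])
      | _, _ => none

def minimalDistance (a : List Int) (b : List Int) : List Int :=
  let s := PySem.List.sorted a (fun x => x) false
  (b.foldl (stepA s) (some [])).getD []

-- ===== PORT B =====
-- Inner-loop step of B: move best to x when x is strictly nearer, or equally near and smaller.
def bestStep (target best x : Int) : Int :=
  if |x - target| < |best - target| ∨ (|x - target| = |best - target| ∧ x < best) then x else best

-- Python B raises IndexError at a[0] when a = [] and b ≠ [] (excluded by Pre_); we return [] there.
def minimalDistance_alt (a : List Int) (b : List Int) : List Int :=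
  match a with
  | [] => []
  | h :: tl => b.map (fun target => tl.foldl (bestStep target) h)

-- ===== PRECONDITION & SPEC =====
-- Pre_ excludes exactly the inputs where BOTH Pythons raise IndexError at a[0]: empty a with nonempty b.
def Pre_minimalDistance (a : List Int) (b : List Int) : Prop := a ≠ [] ∨ b = []
instance (a : List Int) (b : List Int) : Decidable (Pre_minimalDistance a b) := by unfold Pre_minimalDistance; infer_instance
def pvWitness_minimalDistance : List Int × List Int := ([1, 3, -2], [2, 5, 0])

def Spec_minimalDistance (a : List Int) (b : List Int) (out : List Int) : Prop := out = minimalDistance_alt a b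
instance (a : List Int) (b : List Int) (out : List Int) : Decidable (Spec_minimalDistance a b out) := by unfold Spec_minimalDistance; infer_instance

-- ===== CLAIM (what is proved, stated in full; the proofs are below) =====
def Claim_equal_minimalDistance : Prop := ∀ (a : List Int) (b : List Int), Dom_minimalDistance a b → Pre_minimalDistance a b → Spec_minimalDistance a b (minimalDistance a b)

-- ===== LEMMAS AND PROOFS =====

-- Strict "nearer to target, ties toward smaller" order (lexicographic on (|x-t|, x)).
def klt (t x y : Int) : Prop := |x - t| < |y - t| ∨ (|x - t| = |y - t| ∧ x < y)

theorem klt_irrefl (t x : Int) : ¬ klt t x x := by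
  unfold klt; simp only [Int.abs_eq_natAbs]; omega

theorem klt_trans {t x y z : Int} (h1 : klt t x y) (h2 : klt t y z) : klt t x z := by
  unfold klt at *; simp only [Int.abs_eq_natAbs] at *; omega

theorem klt_conn {t x y : Int} (h1 : ¬ klt t x y) (h2 : ¬ klt t y x) : x = y := by
  unfold klt at *; simp only [Int.abs_eq_natAbs] at *; omega

-- m is the nearest element of l to t (ties to the smaller): unique when it exists.
def isMin (t : Int) (l : List Int) (m : Int) : Prop := m ∈ l ∧ ∀ x ∈ l, ¬ klt t x m

theorem isMin_unique {t : Int} {l l' : List Int} {m m' : Int}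
    (hmem : ∀ x, x ∈ l ↔ x ∈ l') (h : isMin t l m) (h' : isMin t l' m') : m = m' := by
  exact klt_conn (h'.2 m ((hmem m).mp h.1)) (h.2 m' ((hmem m').mpr h'.1))

-- B's inner fold computes the minimum of {init} ∪ l in the klt order.
theorem klt_total (t x y : Int) : klt t x y ∨ x = y ∨ klt t y x := by
  unfold klt; simp only [Int.abs_eq_natAbs]; omega

theorem bestStep_cases (t b h : Int) :
    (bestStep t b h = h ∧ klt t h b) ∨ (bestStep t b h = b ∧ ¬ klt t h b) := by
  unfold bestStep klt; split <;> simp_all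

theorem foldl_best (t : Int) (l : List Int) : ∀ (b : Int),
    (l.foldl (bestStep t) b = b ∨ l.foldl (bestStep t) b ∈ l) ∧
    ∀ x, (x = b ∨ x ∈ l) → ¬ klt t x (l.foldl (bestStep t) b) := by
  induction l with
  | nil =>
    intro b
    refine ⟨Or.inl rfl, ?_⟩
    rintro x (rfl | hx)
    · exact klt_irrefl t x
    · simp at hx
  | cons h tl ih =>
    intro b
    simp only [List.foldl_cons]
    obtain ⟨hmem, hmin⟩ := ih (bestStep t b h)
    rcases bestStep_cases t b h with ⟨he, hk⟩ | ⟨he, hnk⟩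
    · refine ⟨?_, ?_⟩
      · rcases hmem with hm | hm
        · exact Or.inr (by rw [hm, he]; simp)
        · exact Or.inr (List.mem_cons_of_mem h hm)
      · rintro x (rfl | hx)
        · exact fun hc => hmin h (Or.inl he.symm) (klt_trans hk hc)
        · rcases List.mem_cons.mp hx with rfl | hx
          · exact hmin x (Or.inl he.symm)
          · exact hmin x (Or.inr hx)
    · refine ⟨?_, ?_⟩
      · rcases hmem with hm | hm
        · exact Or.inl (by rw [hm, he])
        · exact Or.inr (List.mem_cons_of_mem h hm)
      · rintro x (rfl | hx)
        · exact hmin x (Or.inl he.symm)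
        · rcases List.mem_cons.mp hx with rfl | hx
          · intro hc
            rcases klt_total t b x with hbx | rfl | hxb
            · exact hmin b (Or.inl he.symm) (klt_trans hbx hc)
            · exact hmin b (Or.inl he.symm) hc
            · exact hnk hxb
          · exact hmin x (Or.inr hx)

-- The value A appends for one target, extracted as a pure function (proof helper).
def choiceA' (s : List Int) (t : Int) (pos : Nat) : Int :=
  if pos = 0 then (PySem.List.pyGet? s 0).getD 0
  else if pos = s.length then (PySem.List.pyGet? s (-1)).getD 0
  else
    match PySem.List.pyGet? s ((pos : Int) - 1), PySem.List.pyGet? s (pos : Int) with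
    | some u, some v => if t - u ≤ v - t then u else v
    | _, _ => 0

def choiceA (s : List Int) (t : Int) : Int := choiceA' s t (PySem.List.bisectLeft s t)

theorem stepA_some (s : List Int) (hs : s.Pairwise (· ≤ ·)) (hne : s ≠ []) (res : List Int) (t : Int) :
    stepA s (some res) t = some (res ++ [choiceA s t]) := by
  have hlen : 0 < s.length := List.length_pos_iff.mpr hne
  obtain ⟨hposle, -, -⟩ := PySem.List.bisectLeft_spec s t hs
  unfold stepA choiceA choiceA'
  simp only [Option.bind_some]
  split
  · rw [PySem.List.pyGet?_zero, List.getElem?_eq_getElem hlen]; rfl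
  · split
    · rw [PySem.List.pyGet?_neg_one, List.getLast?_eq_getElem?, List.getElem?_eq_getElem (by omega)]
      rfl
    · rename_i hp0 hpl
      set pos := PySem.List.bisectLeft s t with hpos
      have h1 : ((pos : Int) - 1) = ((pos - 1 : Nat) : Int) := by omega
      have hplt : pos < s.length := lt_of_le_of_ne hposle hpl
      rw [h1, PySem.List.pyGet?_natCast, PySem.List.pyGet?_natCast,
        List.getElem?_eq_getElem (by omega : pos - 1 < s.length),
        List.getElem?_eq_getElem hplt]

theorem foldA (s : List Int) (hs : s.Pairwise (· ≤ ·)) (hne : s ≠ []) (bs : List Int) :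
    ∀ (res : List Int), bs.foldl (stepA s) (some res) = some (res ++ bs.map (choiceA s ·)) := by
  induction bs with
  | nil => intro res; simp
  | cons t ts ih =>
    intro res
    simp only [List.foldl_cons, List.map_cons]
    rw [stepA_some s hs hne res t, ih (res ++ [choiceA s t])]
    simp

theorem choiceA_isMin (s : List Int) (hs : s.Pairwise (· ≤ ·)) (hne : s ≠ []) (t : Int) :
    isMin t s (choiceA s t) := by
  have hlen : 0 < s.length := List.length_pos_iff.mpr hne
  obtain ⟨hposle, hlt, hge⟩ := PySem.List.bisectLeft_spec s t hs
  have mono : ∀ i j (hi : i < s.length) (hj : j < s.length), i ≤ j → s[i] ≤ s[j] := by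
    intro i j hi hj hij
    rcases eq_or_lt_of_le hij with rfl | h
    · exact le_refl _
    · exact List.pairwise_iff_getElem.mp hs i j hi hj h
  unfold choiceA choiceA'
  set pos := PySem.List.bisectLeft s t with hposdef
  split
  · -- pos = 0: every element is ≥ t; the head is nearest
    rename_i hp0
    rw [PySem.List.pyGet?_zero, List.getElem?_eq_getElem hlen]
    refine ⟨by simp [List.getElem_mem], ?_⟩
    intro x hx
    obtain ⟨j, hj, rfl⟩ := List.mem_iff_getElem.mp hx
    have h1 : t ≤ s[j] := hge j hj (by omega)
    have h2 : t ≤ s[0] := hge 0 hlen (by omega)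
    have h3 : s[0] ≤ s[j] := mono 0 j hlen hj (Nat.zero_le j)
    unfold klt; simp only [Int.abs_eq_natAbs, Option.getD_some]; omega
  · split
    · -- pos = length: every element is < t; the last is nearest
      rename_i hp0 hpl
      rw [PySem.List.pyGet?_neg_one, List.getLast?_eq_getElem?,
        List.getElem?_eq_getElem (by omega : s.length - 1 < s.length)]
      refine ⟨by simp [List.getElem_mem], ?_⟩
      intro x hx
      obtain ⟨j, hj, rfl⟩ := List.mem_iff_getElem.mp hx
      have h1 : s[j] < t := hlt j hj (by omega)
      have h2 : s[s.length - 1] < t := hlt _ (by omega) (by omega)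
      have h3 : s[j] ≤ s[s.length - 1] := mono j _ hj (by omega) (by omega)
      unfold klt; simp only [Int.abs_eq_natAbs, Option.getD_some]; omega
    · -- 0 < pos < length: compare the two neighbours
      rename_i hp0 hpl
      have hplt : pos < s.length := lt_of_le_of_ne hposle hpl
      have h1 : ((pos : Int) - 1) = ((pos - 1 : Nat) : Int) := by omega
      rw [h1, PySem.List.pyGet?_natCast, PySem.List.pyGet?_natCast,
        List.getElem?_eq_getElem (by omega : pos - 1 < s.length),
        List.getElem?_eq_getElem hplt]
      show isMin t s (if t - s[pos - 1] ≤ s[pos] - t then s[pos - 1] else s[pos])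
      have hu : s[pos - 1] < t := hlt (pos - 1) (by omega) (by omega)
      have hv : t ≤ s[pos] := hge pos hplt (by omega)
      have hkey : ∀ x ∈ s, (x ≤ s[pos - 1] ∧ x < t) ∨ (s[pos] ≤ x ∧ t ≤ x) := by
        intro x hx
        obtain ⟨j, hj, rfl⟩ := List.mem_iff_getElem.mp hx
        by_cases hjp : j < pos
        · exact Or.inl ⟨mono j (pos - 1) hj (by omega) (by omega), hlt j hj hjp⟩
        · exact Or.inr ⟨mono pos j hplt hj (by omega), hge j hj (by omega)⟩
      split
      · refine ⟨by simp [List.getElem_mem], ?_⟩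
        intro x hx
        rcases hkey x hx with ⟨ha, hb⟩ | ⟨ha, hb⟩ <;>
          · unfold klt; simp only [Int.abs_eq_natAbs]; omega
      · refine ⟨by simp [List.getElem_mem], ?_⟩
        intro x hx
        rcases hkey x hx with ⟨ha, hb⟩ | ⟨ha, hb⟩ <;>
          · unfold klt; simp only [Int.abs_eq_natAbs]; omega

-- ===== VERDICT (by name: the statement is the Claim_ definition above) =====
theorem minimalDistance_spec : Claim_equal_minimalDistance := by
  intro a b hdom hpre
  unfold Spec_minimalDistance
  rcases a with _ | ⟨h, tl⟩
  · rcases hpre with hne | rfl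
    · exact absurd rfl hne
    · rfl
  · set s := PySem.List.sorted (h :: tl) (fun x => x) false with hsdef
    have hs : s.Pairwise (· ≤ ·) := PySem.List.sorted_pairwise (h :: tl) (fun x => x)
    have hperm : s.Perm (h :: tl) := PySem.List.sorted_perm (h :: tl) (fun x => x) false
    have hne : s ≠ [] := by
      intro hnil
      have := (hnil ▸ hperm.symm).eq_nil
      simp at this
    have hA : minimalDistance (h :: tl) b = b.map (choiceA s) := by
      unfold minimalDistance
      show (List.foldl (stepA s) (some []) b).getD [] = List.map (choiceA s) b
      rw [foldA s hs hne b []]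
      simp
    rw [hA]
    unfold minimalDistance_alt
    apply List.map_congr_left
    intro t ht
    have hBmin : isMin t (h :: tl) (tl.foldl (bestStep t) h) := by
      obtain ⟨hmem, hmin⟩ := foldl_best t tl h
      refine ⟨?_, ?_⟩
      · rcases hmem with hm | hm
        · rw [hm]; exact List.mem_cons_self
        · exact List.mem_cons_of_mem h hm
      · intro x hx
        rcases List.mem_cons.mp hx with rfl | hx
        · exact hmin x (Or.inl rfl)
        · exact hmin x (Or.inr hx)
    exact isMin_unique (fun x => hperm.mem_iff) (choiceA_isMin s hs hne t) hBmin
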